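-- pv_equiv track=rewrite | github.com/AlexandrSech/Z63-TMS | examples/jj.py | foo
-- ===== SOURCE A (Python) =====
-- def foo(x:int):
--     temp_list = []
--     for i in range(1, x):
--         if x % i == 0:
--             temp_list.append(i)
--     result_list = []
--     for z in temp_list:
--         for i in range(2, z-1):
--             if z % i == 0:
--                 break
--         else:
--             result_list.append(z)
--     return result_list
-- ===== SOURCE B (Python) =====
-- def _is_prime(z):
--     if z < 2:
--         return False
--     i = 2
--     while i * i <= z:
--         if z % i == 0:
--             return False
--         i += 1
--     return True
--
--
-- def foo(x: int):
--     divs = []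
--     i = 1
--     while i * i <= x:
--         if x % i == 0:
--             if i != x:
--                 divs.append(i)
--             j = x // i
--             if j != i and j != x:
--                 divs.append(j)
--         i += 1
--     divs.sort()
--     return [d for d in divs if d == 1 or _is_prime(d)]
-- ===== Notes on version B (the rewrite author's own statement) =====
-- stated objective: faster
-- what changed: B enumerates divisors only up to sqrt(x) via the d,x//d pairing and sorts them, and tests each kept divisor for primality by trial division only up to its square root, instead of A's full scan to x and per-divisor scan to z-2.
import Mathlib
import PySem

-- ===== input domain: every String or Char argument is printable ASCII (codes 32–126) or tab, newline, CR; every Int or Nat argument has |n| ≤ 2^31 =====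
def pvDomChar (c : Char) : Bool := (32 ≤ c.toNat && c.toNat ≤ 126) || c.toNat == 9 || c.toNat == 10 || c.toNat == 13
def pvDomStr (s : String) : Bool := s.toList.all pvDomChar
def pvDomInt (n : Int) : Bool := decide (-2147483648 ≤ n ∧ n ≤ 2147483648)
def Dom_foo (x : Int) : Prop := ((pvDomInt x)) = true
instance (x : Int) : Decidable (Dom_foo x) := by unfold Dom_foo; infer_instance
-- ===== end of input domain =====

-- B enumerates divisors only up to √x via the (d, x//d) pairing and sorts them, testing
-- primality of each kept divisor only up to its square root; A scans to x and to z-2.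

-- ===== PORT A =====
-- A's inner 'for i in range(2, z-1): if z % i == 0: break / else: append' as a short-circuit all
def fooKeep (z : Int) : Bool :=
  (PySem.List.pyRange 2 (z - 1) 1).all (fun i => !(PySem.Int.mod z i == 0))

def foo (x : Int) : List Int :=
  let temp := (PySem.List.pyRange 1 x 1).foldl
    (fun acc i => if PySem.Int.mod x i == 0 then acc ++ [i] else acc) []
  temp.foldl (fun acc z => if fooKeep z then acc ++ [z] else acc) []

-- ===== PORT B =====
-- while i * i <= z: if z % i == 0: return False; i += 1   (helper of _is_prime)
def hasFac (z i : Int) : Bool :=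
  if _h : i * i ≤ z then
    (if PySem.Int.mod z i == 0 then true else hasFac z (i + 1))
  else false
termination_by (z - i + 1).toNat
decreasing_by
  have hii : i ≤ i * i := by nlinarith [sq_nonneg i, sq_nonneg (i - 1)]
  omega

def isPrimeB (z : Int) : Bool := if z < 2 then false else !hasFac z 2

-- while i * i <= x: collect i and x // i (proper divisors only)
def collect (x i : Int) : List Int :=
  if _h : i * i ≤ x then
    (if PySem.Int.mod x i == 0 then
      (if i ≠ x then [i] else []) ++
        (let j := PySem.Int.floordiv x i
         if j ≠ i ∧ j ≠ x then [j] else [])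
     else []) ++ collect x (i + 1)
  else []
termination_by (x - i + 1).toNat
decreasing_by
  have hii : i ≤ i * i := by nlinarith [sq_nonneg i, sq_nonneg (i - 1)]
  omega

def foo_alt (x : Int) : List Int :=
  (PySem.List.sorted (collect x 1) (fun d => d) false).filter
    (fun d => d == 1 || isPrimeB d)

-- ===== PRECONDITION & SPEC =====
def Spec_foo (x : Int) (out : List Int) : Prop := out = foo_alt x
instance (x : Int) (out : List Int) : Decidable (Spec_foo x out) := by unfold Spec_foo; infer_instance

-- ===== CLAIM (what is proved, stated in full; the proofs are below) =====
def Claim_equal_foo : Prop := ∀ (x : Int), Dom_foo x → Spec_foo x (foo x)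

-- ===== LEMMAS AND PROOFS =====

lemma mem_ite_singleton {c : Prop} [Decidable c] {a d : Int} :
    (d ∈ (if c then [a] else ([] : List Int))) ↔ c ∧ d = a := by
  split_ifs with h <;> simp [h]


lemma ediv_ediv_self {x i : Int} (hx : 1 ≤ x) (hi : 0 < i) (hd : i ∣ x) : x / (x / i) = i := by
  have hq : x / i * i = x := Int.ediv_mul_cancel hd
  have h2 := Int.mul_ediv_cancel_left (a := x / i) i (by
    intro h0
    rw [h0] at hq
    simp at hq
    omega)
  rw [hq] at h2
  exact h2

lemma mem_collect (x : Int) (hx : 1 ≤ x) : ∀ i d : Int, 1 ≤ i →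
    (d ∈ collect x i ↔ d ∣ x ∧ 1 ≤ d ∧ d ≠ x ∧ i ≤ (if d * d ≤ x then d else x / d)) := by
  intro i d
  induction i using collect.induct (x := x) with
  | case1 i h ih =>
    intro hi
    have ih' := ih (by omega)
    have hipos : (0:Int) < i := by omega
    rw [collect]
    simp only [dif_pos h, List.mem_append]
    by_cases hdv : (PySem.Int.mod x i == 0) = true
    · have hdvd : i ∣ x := (PySem.Int.mod_eq_zero_iff_dvd x i).mp (by simpa using hdv)
      have hq : x / i * i = x := Int.ediv_mul_cancel hdvd
      have hqdvd : (x / i) ∣ x := ⟨i, hq.symm⟩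
      have hile : i ≤ x := by nlinarith
      have hq1 : 1 ≤ x / i := (Int.le_ediv_iff_mul_le hipos (a := 1) (b := x)).mpr (by omega)
      have hiq : i ≤ x / i := (Int.le_ediv_iff_mul_le hipos).mpr h
      have hxq : x / (x / i) = i := ediv_ediv_self hx hipos hdvd
      simp only [if_pos hdv, List.mem_append, mem_ite_singleton, ih',
        PySem.Int.floordiv_eq_ediv_of_pos hipos]
      constructor
      · rintro ((⟨hne, rfl⟩ | ⟨⟨hne, hnx⟩, rfl⟩) | htail)
        · exact ⟨hdvd, hi, hne, by rw [if_pos h]⟩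
        · refine ⟨hqdvd, hq1, hnx, ?_⟩
          have hnot : ¬ (x / i) * (x / i) ≤ x := by
            intro hle
            have hle2 : x / i ≤ x / (x / i) := (Int.le_ediv_iff_mul_le (by omega)).mpr hle
            rw [hxq] at hle2
            omega
          rw [if_neg hnot, hxq]
        · obtain ⟨h1, h2, h3, h4⟩ := htail
          exact ⟨h1, h2, h3, by omega⟩
      · rintro ⟨hd2, hd1, hdx, him⟩
        have hdpos : (0:Int) < d := by omega
        have hdle : d ≤ x := Int.le_of_dvd (by omega) hd2
        have hdvx : x / d * d = x := Int.ediv_mul_cancel hd2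
        have hdq : (x / d) ∣ x := ⟨d, hdvx.symm⟩
        have hxd : x / (x / d) = d := ediv_ediv_self hx hdpos hd2
        by_cases hdd : d * d ≤ x
        · rw [if_pos hdd] at him
          rcases eq_or_lt_of_le him with rfl | hlt
          · exact Or.inl (Or.inl ⟨hdx, rfl⟩)
          · exact Or.inr ⟨hd2, hd1, hdx, by rw [if_pos hdd]; omega⟩
        · rw [if_neg hdd] at him
          by_cases heq : x / d = i
          · left; right
            have hdi : d = x / i := by rw [← heq, hxd]
            refine ⟨⟨?_, ?_⟩, hdi⟩
            · rw [← hdi]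
              intro hcon
              exact hdd (hcon ▸ h)
            · rw [← hdi]; exact hdx
          · exact Or.inr ⟨hd2, hd1, hdx, by rw [if_neg hdd]; omega⟩
    · -- i does not divide x: nothing appended at this step
      simp only [if_neg hdv, List.not_mem_nil, false_or, ih']
      constructor
      · rintro ⟨h1, h2, h3, h4⟩
        exact ⟨h1, h2, h3, by omega⟩
      · rintro ⟨hd2, hd1, hdx, him⟩
        refine ⟨hd2, hd1, hdx, ?_⟩
        have hdpos : (0:Int) < d := by omega
        have hdvx : x / d * d = x := Int.ediv_mul_cancel hd2
        have hdq : (x / d) ∣ x := ⟨d, hdvx.symm⟩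
        by_cases hdd : d * d ≤ x
        · rw [if_pos hdd] at him ⊢
          rcases eq_or_lt_of_le him with rfl | hlt
          · exact absurd (by simpa using (PySem.Int.mod_eq_zero_iff_dvd x i).mpr hd2) hdv
          · omega
        · rw [if_neg hdd] at him ⊢
          rcases eq_or_lt_of_le him with heq | hlt
          · exfalso
            apply hdv
            rw [heq.symm] at hdq
            simpa using (PySem.Int.mod_eq_zero_iff_dvd x i).mpr hdq
          · omega
  | case2 i h =>
    intro hi
    rw [collect]
    simp only [dif_neg h, List.not_mem_nil, false_iff]
    rintro ⟨hd2, hd1, hdx, him⟩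
    have hdpos : (0:Int) < d := by omega
    have hdvx : x / d * d = x := Int.ediv_mul_cancel hd2
    by_cases hdd : d * d ≤ x
    · rw [if_pos hdd] at him
      have : i * i ≤ d * d := by nlinarith
      omega
    · rw [if_neg hdd] at him
      set q := x / d with hq
      have hdle : d ≤ x := Int.le_of_dvd (by omega) hd2
      have hq1 : 1 ≤ q := (Int.le_ediv_iff_mul_le hdpos (a := 1) (b := x)).mpr (by omega)
      have hqd : q < d := by
        have := (Int.ediv_lt_iff_lt_mul hdpos (b := d) (a := x)).mpr (by omega)
        simpa using this
      have hqq : q * q ≤ x := by nlinarith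
      have : i * i ≤ q * q := by nlinarith
      omega

lemma hasFac_iff (z : Int) : ∀ i : Int, 1 ≤ i →
    (hasFac z i = true ↔ ∃ k, i ≤ k ∧ k * k ≤ z ∧ k ∣ z) := by
  intro i
  induction i using hasFac.induct (z := z) with
  | case1 i h hd =>
    intro hi
    rw [hasFac]
    simp only [dif_pos h, if_pos hd, true_iff]
    exact ⟨i, le_refl i, h, (PySem.Int.mod_eq_zero_iff_dvd z i).mp (by simpa using hd)⟩
  | case2 i h hd ih =>
    intro hi
    rw [hasFac]
    simp only [dif_pos h, if_neg hd]
    rw [ih (by omega)]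
    constructor
    · rintro ⟨k, hk1, hk2, hk3⟩; exact ⟨k, by omega, hk2, hk3⟩
    · rintro ⟨k, hk1, hk2, hk3⟩
      refine ⟨k, ?_, hk2, hk3⟩
      rcases eq_or_lt_of_le hk1 with rfl | h'
      · exact absurd (by simpa using (PySem.Int.mod_eq_zero_iff_dvd z i).mpr hk3) hd
      · omega
  | case3 i h =>
    intro hi
    rw [hasFac]
    simp only [dif_neg h, Bool.false_eq_true, false_iff]
    rintro ⟨k, hk1, hk2, hk3⟩
    have : i * i ≤ k * k := by nlinarith
    omega

lemma nodup_collect (x : Int) (hx : 1 ≤ x) : ∀ i : Int, 1 ≤ i → (collect x i).Nodup := by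
  intro i
  induction i using collect.induct (x := x) with
  | case1 i h ih =>
    intro hi
    have hipos : (0:Int) < i := by omega
    rw [collect]
    simp only [dif_pos h]
    by_cases hdv : (PySem.Int.mod x i == 0) = true
    · have hdvd : i ∣ x := (PySem.Int.mod_eq_zero_iff_dvd x i).mp (by simpa using hdv)
      have hq : x / i * i = x := Int.ediv_mul_cancel hdvd
      have hile : i ≤ x := by nlinarith
      have hiq : i ≤ x / i := (Int.le_ediv_iff_mul_le hipos).mpr h
      have hxq : x / (x / i) = i := ediv_ediv_self hx hipos hdvd
      simp only [if_pos hdv, PySem.Int.floordiv_eq_ediv_of_pos hipos]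
      rw [List.nodup_append]
      refine ⟨?_, ih (by omega), ?_⟩
      · rw [List.nodup_append]
        refine ⟨by split_ifs <;> simp, by split_ifs <;> simp, ?_⟩
        intro a ha b hb
        rw [mem_ite_singleton] at ha hb
        obtain ⟨-, rfl⟩ := ha
        obtain ⟨⟨hne, -⟩, rfl⟩ := hb
        exact fun hc => hne hc.symm
      · intro a ha b hb
        rw [List.mem_append, mem_ite_singleton, mem_ite_singleton] at ha
        have hbm := (mem_collect x hx (i + 1) b (by omega)).mp hb
        obtain ⟨hb1, hb2, hb3, hb4⟩ := hbm
        rcases ha with ⟨-, rfl⟩ | ⟨⟨hne, -⟩, rfl⟩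
        · intro hc
          rw [← hc, if_pos h] at hb4
          omega
        · intro hc
          have hnot : ¬ (x / i) * (x / i) ≤ x := by
            intro hle
            have hle2 : x / i ≤ x / (x / i) :=
              (Int.le_ediv_iff_mul_le (by omega)).mpr hle
            rw [hxq] at hle2
            exact hne (by omega)
          rw [← hc, if_neg hnot, hxq] at hb4
          omega
    · simp only [if_neg hdv, List.nil_append]
      exact ih (by omega)
  | case2 i h =>
    intro hi
    rw [collect]
    simp [dif_neg h]

lemma pyRange_pairwise : ∀ (n : Nat) (a b : Int), (b - a).toNat = n →
    (PySem.List.pyRange a b 1).Pairwise (· < ·) := by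
  intro n
  induction n with
  | zero =>
    intro a b h
    have hlen := PySem.List.length_pyRange_one a b
    rw [h] at hlen
    rw [List.length_eq_zero_iff.mp hlen]
    exact List.Pairwise.nil
  | succ n ihn =>
    intro a b h
    have hab : a < b := by omega
    rw [PySem.List.pyRange_one_cons hab]
    refine List.Pairwise.cons ?_ (ihn (a + 1) b (by omega))
    intro y hy
    rw [PySem.List.mem_pyRange_one] at hy
    omega

lemma keep_eq (z : Int) (hz : 1 ≤ z) : fooKeep z = (z == 1 || isPrimeB z) := by
  have h4 : z = 1 ∨ z = 2 ∨ z = 3 ∨ 4 ≤ z := by omega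
  rcases h4 with rfl | rfl | rfl | h4
  · decide
  · unfold isPrimeB
    rw [hasFac]
    decide
  · unfold isPrimeB
    rw [hasFac]
    decide
  · rw [Bool.eq_iff_iff]
    unfold fooKeep isPrimeB
    rw [List.all_eq_true]
    have hne1 : (z == 1) = false := by simp; omega
    rw [hne1, if_neg (by omega : ¬ z < 2)]
    simp only [Bool.false_or, Bool.not_eq_true']
    constructor
    · intro hall
      rw [← Bool.not_eq_true, hasFac_iff z 2 (by omega)]
      rintro ⟨k, hk2, hkk, hkd⟩
      have hk3 : k < z - 1 := by nlinarith
      have hthis := hall k (PySem.List.mem_pyRange_one.mpr ⟨hk2, hk3⟩)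
      rw [(PySem.Int.mod_eq_zero_iff_dvd z k).mpr hkd] at hthis
      simp at hthis
    · intro hpr k hk
      rw [PySem.List.mem_pyRange_one] at hk
      simp only [beq_eq_false_iff_ne, ne_eq]
      intro hmod
      have hkd : k ∣ z := (PySem.Int.mod_eq_zero_iff_dvd z k).mp hmod
      have hnofac : ¬ ∃ m, 2 ≤ m ∧ m * m ≤ z ∧ m ∣ z := by
        intro hcon
        exact absurd ((hasFac_iff z 2 (by omega)).mpr hcon) (by simp [hpr])
      apply hnofac
      by_cases hkk : k * k ≤ z
      · exact ⟨k, hk.1, hkk, hkd⟩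
      · have hkpos : (0:Int) < k := by omega
        have hqk : z / k * k = z := Int.ediv_mul_cancel hkd
        set q := z / k with hqdef
        have hq1 : 1 ≤ q := (Int.le_ediv_iff_mul_le hkpos (a := 1) (b := z)).mpr (by omega)
        have hqlt : q < k := by
          have := (Int.ediv_lt_iff_lt_mul hkpos (b := k) (a := z)).mpr (by omega)
          simpa using this
        have hq2 : 2 ≤ q := by
          rcases eq_or_lt_of_le hq1 with heq | _
          · exfalso; rw [← heq] at hqk; omega
          · omega
        have hqq : q * q ≤ z := by nlinarith
        exact ⟨q, hq2, hqq, ⟨k, hqk.symm⟩⟩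

-- ===== VERDICT (by name: the statement is the Claim_ definition above) =====
theorem foo_spec : Claim_equal_foo := by
  intro x _
  unfold Spec_foo foo foo_alt
  by_cases hx : 1 ≤ x
  · simp only [PySem.List.foldl_append_if_eq_filter, List.nil_append]
    set T := (PySem.List.pyRange 1 x 1).filter (fun i => PySem.Int.mod x i == 0) with hT
    have hTmem : ∀ d, d ∈ T ↔ 1 ≤ d ∧ d < x ∧ d ∣ x := by
      intro d
      rw [hT, List.mem_filter, PySem.List.mem_pyRange_one]
      constructor
      · rintro ⟨⟨h1, h2⟩, h3⟩
        exact ⟨h1, h2, (PySem.Int.mod_eq_zero_iff_dvd x d).mp (by simpa using h3)⟩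
      · rintro ⟨h1, h2, h3⟩
        exact ⟨⟨h1, h2⟩, by simpa using (PySem.Int.mod_eq_zero_iff_dvd x d).mpr h3⟩
    have hTpair : T.Pairwise (· < ·) :=
      List.Pairwise.sublist (List.filter_sublist) (pyRange_pairwise (x - 1).toNat 1 x rfl)
    have hTnodup : T.Nodup := hTpair.imp (fun h => ne_of_lt h)
    have hperm : T.Perm (collect x 1) := by
      rw [List.perm_ext_iff_of_nodup hTnodup (nodup_collect x hx 1 (le_refl 1))]
      intro a
      rw [hTmem, mem_collect x hx 1 a (le_refl 1)]
      constructor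
      · rintro ⟨h1, h2, h3⟩
        refine ⟨h3, h1, ne_of_lt h2, ?_⟩
        split_ifs
        · exact h1
        · exact (Int.le_ediv_iff_mul_le (by omega) (a := 1) (b := x)).mpr (by omega)
      · rintro ⟨h1, h2, h3, -⟩
        exact ⟨h2, lt_of_le_of_ne (Int.le_of_dvd (by omega) h1) h3, h1⟩
    have hsorted : PySem.List.sorted (collect x 1) (fun d => d) false = T :=
      PySem.List.sorted_eq_of_perm_of_pairwise_lt _ _ _ hperm hTpair
    rw [hsorted]
    apply List.filter_congr
    intro z hz
    exact keep_eq z ((hTmem z).mp hz).1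
  · have hr : PySem.List.pyRange 1 x 1 = [] :=
      List.length_eq_zero_iff.mp (by rw [PySem.List.length_pyRange_one]; omega)
    have hc : collect x 1 = [] := by
      rw [collect, dif_neg (show ¬ (1 * 1 : Int) ≤ x by omega)]
    rw [hr, hc]
    simp
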